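-- pv_equiv track=rewrite | github.com/sepandhaghighi/pycounter | line_counter.py | comment
-- ===== SOURCE A (Python) =====
-- import string
--
-- def comment(line): # this function extract comment
--     index=line.find("#") # search for # as comment sign
--     if index!=-1: # if it's in the line
--         sub_line=line[:index] # create sub_line as prev chars
--         for i in sub_line: # if there is any chars before this sign it's not comment
--             if i in string.ascii_letters or i in string.punctuation:
--                 return False
--                 break
--         return True
--     else: # if there is no sign of # in the line , it's not a comment
--         return False
-- ===== SOURCE B (Python) =====
-- import string
--
-- def comment(line):
--     # single left-to-right scan: '#' wins before the letter/punctuation test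
--     for c in line:
--         if c == "#":
--             return True
--         if c in string.ascii_letters or c in string.punctuation:
--             return False
--     return False
-- ===== Notes on version B (the rewrite author's own statement) =====
-- stated objective: simpler
-- what changed: Replaces find+slice+second prefix scan with one left-to-right scan that returns True on '#' and False on any earlier letter/punctuation character.
import Mathlib
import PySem

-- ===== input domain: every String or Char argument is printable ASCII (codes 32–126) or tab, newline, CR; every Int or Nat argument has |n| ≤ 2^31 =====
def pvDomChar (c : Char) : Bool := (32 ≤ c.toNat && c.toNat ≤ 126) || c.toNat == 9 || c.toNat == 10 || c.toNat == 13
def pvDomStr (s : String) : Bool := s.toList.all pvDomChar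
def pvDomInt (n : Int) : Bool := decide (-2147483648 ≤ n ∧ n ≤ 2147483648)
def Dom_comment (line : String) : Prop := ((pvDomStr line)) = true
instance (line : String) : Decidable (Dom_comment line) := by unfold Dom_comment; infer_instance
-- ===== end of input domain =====

-- B is one left-to-right scan instead of A's find+slice+prefix scan; return value only, same behaviour.
-- ===== PORT A =====
def pvLetters : List Char := "abcdefghijklmnopqrstuvwxyzABCDEFGHIJKLMNOPQRSTUVWXYZ".toList
def pvPunct : List Char := "!\"#$%&'()*+,-./:;<=>?@[\\]^_`{|}~".toList
-- membership test 'i in string.ascii_letters or i in string.punctuation'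
def pvIsLP (c : Char) : Bool := (c ∈ pvLetters) || (c ∈ pvPunct)

-- 'for i in sub_line: if LP(i): return False' then 'return True'
def commentLoopA : List Char → Bool
  | [] => true
  | c :: cs => if pvIsLP c then false else commentLoopA cs

def comment (line : String) : Bool :=
  let index := PySem.Str.find line "#"
  if index ≠ -1 then
    commentLoopA (PySem.Str.slice line none (some index)).toList
  else false

-- ===== PORT B =====
def commentScanB : List Char → Bool
  | [] => false
  | c :: cs => if c = '#' then true else if pvIsLP c then false else commentScanB cs

def comment_alt (line : String) : Bool := commentScanB line.toList

-- ===== PRECONDITION & SPEC =====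
def Spec_comment (line : String) (out : Bool) : Prop := out = comment_alt line
instance (line : String) (out : Bool) : Decidable (Spec_comment line out) := by unfold Spec_comment; infer_instance

-- ===== CLAIM (what is proved, stated in full; the proofs are below) =====
def Claim_equal_comment : Prop := ∀ (line : String), Dom_comment line → Spec_comment line (comment line)

-- ===== LEMMAS AND PROOFS =====
theorem scanB_no_hash (l : List Char) (h : '#' ∉ l) : commentScanB l = false := by
  induction l with
  | nil => rfl
  | cons c cs ih =>
    simp only [List.mem_cons, not_or] at h
    have hc : ¬ (c = '#') := fun e => h.1 e.symm
    simp only [commentScanB, if_neg hc]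
    split
    · rfl
    · exact ih h.2

theorem scanB_split (pre rest : List Char) (h : '#' ∉ pre) :
    commentScanB (pre ++ '#' :: rest) = commentLoopA pre := by
  induction pre with
  | nil => simp [commentScanB, commentLoopA]
  | cons c cs ih =>
    simp only [List.mem_cons, not_or] at h
    have hc : ¬ (c = '#') := fun e => h.1 e.symm
    simp only [List.cons_append, commentScanB, commentLoopA, if_neg hc]
    split
    · rfl
    · exact ih h.2

theorem singleton_prefix_iff (c : Char) (l : List Char) :
    [c] <+: l ↔ l.head? = some c := by
  cases l with
  | nil => simp
  | cons a t => simp [List.cons_prefix_cons, eq_comm]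

-- ===== VERDICT (by name: the statement is the Claim_ definition above) =====
theorem comment_spec : Claim_equal_comment := by
  intro line _
  unfold Spec_comment comment comment_alt
  simp only [PySem.Str.find_eq, show ("#" : String).toList = ['#'] from rfl]
  by_cases hf : PySem.Chars.find line.toList ['#'] = -1
  · rw [if_neg (by simp [hf])]
    have hni : ¬ (['#'] <:+: line.toList) :=
      (PySem.Chars.find_eq_neg_one_iff line.toList _).mp hf
    have hm : '#' ∉ line.toList := fun hmem =>
      hni ((List.singleton_infix_iff _ _).mpr hmem)
    rw [scanB_no_hash _ hm]
  · have h0 : 0 ≤ PySem.Chars.find line.toList ['#'] := by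
      have := PySem.Chars.neg_one_le_find line.toList ['#']
      omega
    obtain ⟨hpre, hmin⟩ := PySem.Chars.find_spec (s := line.toList) (sub := ['#']) h0
    set j := (PySem.Chars.find line.toList ['#']).toNat with hj
    obtain ⟨t, ht⟩ := hpre
    have hsplit : line.toList = line.toList.take j ++ '#' :: t := by
      conv_lhs => rw [← List.take_append_drop j line.toList]
      rw [← ht]; rfl
    have hjlen : j ≤ line.toList.length := by
      have := PySem.Chars.find_le_length line.toList ['#']
      omega
    have hnh : '#' ∉ line.toList.take j := by
      intro hmem
      obtain ⟨i, hi, hget⟩ := List.getElem_of_mem hmem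
      have hij : i < j := lt_of_lt_of_le hi (by simp [List.length_take])
      refine hmin i hij ?_
      rw [singleton_prefix_iff, List.head?_drop]
      rw [List.getElem_take] at hget
      rw [List.getElem?_eq_getElem (lt_of_lt_of_le hij hjlen), hget]
    rw [if_pos (by simpa using hf)]
    have hslice : (PySem.Str.slice line none
        (some (PySem.Chars.find line.toList ['#']))).toList
        = line.toList.take j := by
      rw [PySem.Str.toList_slice]
      simp only [PySem.Chars.slice_eq_listSlice]
      rw [PySem.List.slice_to]
      exact h0
    rw [hslice]
    conv_rhs => rw [hsplit]
    rw [scanB_split _ _ hnh]
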